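-- pv_equiv track=rewrite | github.com/traceloop/openllmetry | packages/opentelemetry-instrumentation-replicate/opentelemetry/instrumentation/replicate/safety.py | _should_mask_prompt_key
-- ===== SOURCE A (Python) =====
-- _PROMPT_KEY_MARKERS = ("prompt", "text", "input", "query", "instruction")
--
-- def _should_mask_prompt_key(key):
--     if not isinstance(key, str):
--         return False
--     normalized = key.lower()
--     return any(
--         normalized == marker
--         or normalized.startswith(f"{marker}_")
--         or normalized.startswith(f"{marker}.")
--         for marker in _PROMPT_KEY_MARKERS
--     )
-- ===== SOURCE B (Python) =====
-- _PROMPT_KEY_MARKER_SET = {"prompt", "text", "input", "query", "instruction"}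
--
--
-- def _should_mask_prompt_key(key):
--     if not isinstance(key, str):
--         return False
--     s = key.lower()
--     cut = len(s)
--     for sep in "_.":
--         i = s.find(sep)
--         if i != -1 and i < cut:
--             cut = i
--     return s[:cut] in _PROMPT_KEY_MARKER_SET
-- ===== Notes on version B (the rewrite author's own statement) =====
-- stated objective: idiomatic
-- what changed: Instead of A's loop over the five markers with three equality/prefix tests each, B locates the earliest separator ('_' or '.') via str.find, slices the leading token off the lowercased key once, and tests membership in a precomputed marker set.
import Mathlib
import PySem

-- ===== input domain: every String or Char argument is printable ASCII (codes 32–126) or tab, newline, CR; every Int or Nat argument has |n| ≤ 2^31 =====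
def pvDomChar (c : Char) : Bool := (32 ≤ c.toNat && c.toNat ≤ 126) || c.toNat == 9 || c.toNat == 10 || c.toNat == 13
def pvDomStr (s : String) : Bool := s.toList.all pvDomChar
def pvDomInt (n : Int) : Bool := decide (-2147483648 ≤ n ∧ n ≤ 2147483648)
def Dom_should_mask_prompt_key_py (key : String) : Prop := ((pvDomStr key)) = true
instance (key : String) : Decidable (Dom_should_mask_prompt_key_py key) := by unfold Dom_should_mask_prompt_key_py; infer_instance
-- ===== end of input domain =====

-- B locates the earliest separator ('_' or '.') with str.find, slices the leading token of the lowercased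
-- key once, and tests membership in a marker set, instead of A's per-marker equality/prefix checks (idiomatic).

-- ===== PORT A =====
-- _PROMPT_KEY_MARKERS, as char lists (string facts are proved on the list side)
def pvMarkersA : List (List Char) :=
  [['p','r','o','m','p','t'], ['t','e','x','t'], ['i','n','p','u','t'],
   ['q','u','e','r','y'], ['i','n','s','t','r','u','c','t','i','o','n']]

def should_mask_prompt_key_py (key : String) : Bool :=
  -- key is a str by typing, so the isinstance guard is always passed
  let normalized := PySem.Chars.lower key.toList
  pvMarkersA.any (fun marker =>
    normalized == marker
      || PySem.Chars.startswith normalized (marker ++ ['_'])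
      || PySem.Chars.startswith normalized (marker ++ ['.']))

-- ===== PORT B =====
def pvMarkerSetB : PySem.Set (List Char) :=
  PySem.Set.ofList (["prompt", "text", "input", "query", "instruction"].map String.toList)

def should_mask_prompt_key_py_alt (key : String) : Bool :=
  let s := PySem.Chars.lower key.toList
  -- for sep in "_.":  i = s.find(sep);  if i != -1 and i < cut: cut = i
  let cut : Int := ['_', '.'].foldl
    (fun cut sep =>
      let i := PySem.Chars.find s [sep]
      if i ≠ -1 ∧ i < cut then i else cut)
    (s.length : Int)
  PySem.Set.contains pvMarkerSetB (PySem.Chars.slice s none (some cut))  -- s[:cut] in the marker set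

-- ===== PRECONDITION & SPEC =====
def Spec_should_mask_prompt_key_py (key : String) (out : Bool) : Prop := out = should_mask_prompt_key_py_alt key
instance (key : String) (out : Bool) : Decidable (Spec_should_mask_prompt_key_py key out) := by unfold Spec_should_mask_prompt_key_py; infer_instance

-- ===== CLAIM (what is proved, stated in full; the proofs are below) =====
def Claim_equal_should_mask_prompt_key_py : Prop := ∀ (key : String), Dom_should_mask_prompt_key_py key → Spec_should_mask_prompt_key_py key (should_mask_prompt_key_py key)

-- ===== LEMMAS AND PROOFS =====

theorem pv_sw_cons (c : Char) (s p : List Char) :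
    PySem.Chars.startswith (c :: s) (c :: p) = PySem.Chars.startswith s p := by
  rw [Bool.eq_iff_iff]
  simp [PySem.Chars.startswith_iff, List.cons_prefix_cons]

theorem pv_sw_cons_ne {c a : Char} (h : c ≠ a) (s p : List Char) :
    PySem.Chars.startswith (c :: s) (a :: p) = false := by
  rw [← Bool.not_eq_true, PySem.Chars.startswith_iff, List.cons_prefix_cons]
  exact fun hp => h hp.1.symm

theorem pv_sw_nil_cons (a : Char) (p : List Char) :
    PySem.Chars.startswith [] (a :: p) = false := by
  rw [← Bool.not_eq_true, PySem.Chars.startswith_iff]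
  simp

-- For a marker m free of separator characters, A's three checks on l say exactly "the leading token of l is m".
theorem pv_marker_iff (m l : List Char)
    (hm : m.all (fun ch => !(ch == '_' || ch == '.')) = true) :
    (l == m
      || PySem.Chars.startswith l (m ++ ['_'])
      || PySem.Chars.startswith l (m ++ ['.']))
    = (l.takeWhile (fun ch => !(ch == '_' || ch == '.')) == m) := by
  induction m generalizing l with
  | nil =>
    cases l with
    | nil => simp [PySem.Chars.startswith]
    | cons c t =>
      simp only [List.nil_append, List.takeWhile_cons]
      by_cases h1 : c = '_'
      · subst h1; simp [PySem.Chars.startswith_iff, List.cons_prefix_cons]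
      · by_cases h2 : c = '.'
        · subst h2; simp [PySem.Chars.startswith_iff, List.cons_prefix_cons]
        · simp [pv_sw_cons_ne h1, pv_sw_cons_ne h2, h1, h2]
  | cons a m' ih =>
    rw [List.all_cons, Bool.and_eq_true] at hm
    obtain ⟨hpa, hm'⟩ := hm
    cases l with
    | nil =>
      simp [pv_sw_nil_cons]
    | cons c t =>
      by_cases hca : c = a
      · subst hca
        simp only [List.cons_append, pv_sw_cons, List.takeWhile_cons, hpa, if_true,
          List.cons_beq_cons, BEq.refl, Bool.true_and]
        exact ih t hm'
      · have hba : (c == a) = false := by simp [hca]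
        by_cases hc1 : c = '_'
        · subst hc1
          simp [pv_sw_cons_ne hca, hba]
        · by_cases hc2 : c = '.'
          · subst hc2
            simp [pv_sw_cons_ne hca, hba]
          · simp [pv_sw_cons_ne hca, hc1, hc2, hba, List.cons_beq_cons]

-- Chars.find for a single-character needle, in terms of List.findIdx.
theorem pv_go_single (a : Char) (s : List Char) (k : Nat) :
    PySem.Chars.find.go [a] s k =
      if s.findIdx (· == a) = s.length then -1 else ((k + s.findIdx (· == a) : Nat) : Int) := by
  induction s generalizing k with
  | nil => simp [PySem.Chars.find.go]
  | cons c t ih =>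
    rw [PySem.Chars.find.go]
    by_cases hca : c = a
    · subst hca
      simp [List.isPrefixOf, List.findIdx_cons]
    · have h1 : ([a].isPrefixOf (c :: t)) = false := by
        simp [List.isPrefixOf, Ne.symm hca]
      have h2 : (c == a) = false := by simp [hca]
      rw [h1]
      simp only [Bool.false_eq_true, if_false, ih]
      simp only [List.findIdx_cons, h2, cond_false, List.length_cons, Nat.add_left_inj]
      split_ifs with h
      · rfl
      · push_cast; ring_nf

theorem pv_find_single (a : Char) (s : List Char) :
    PySem.Chars.find s [a] =
      if s.findIdx (· == a) = s.length then -1 else (s.findIdx (· == a) : Int) := by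
  rw [PySem.Chars.find, pv_go_single]
  simp

-- take up to the earlier of the two separator positions = takeWhile "not a separator"
theorem pv_take_min (s : List Char) :
    s.take (min (s.findIdx (· == '_')) (s.findIdx (· == '.'))) =
      s.takeWhile (fun ch => !(ch == '_' || ch == '.')) := by
  induction s with
  | nil => simp
  | cons c t ih =>
    by_cases h1 : c = '_'
    · subst h1; simp [List.findIdx_cons]
    · by_cases h2 : c = '.'
      · subst h2; simp [List.findIdx_cons]
      · have b1 : (c == '_') = false := by simp [h1]
        have b2 : (c == '.') = false := by simp [h2]
        simp only [List.findIdx_cons, b1, b2, cond_false]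
        rw [show min (t.findIdx (· == '_') + 1) (t.findIdx (· == '.') + 1)
              = min (t.findIdx (· == '_')) (t.findIdx (· == '.')) + 1 from by omega,
           List.take_succ_cons, ih]
        simp [b1, b2]

-- B's computed cut, as a Nat: the earlier separator position.
theorem pv_cut_eq (s : List Char) :
    (['_', '.'].foldl
      (fun cut sep =>
        let i := PySem.Chars.find s [sep]
        if i ≠ -1 ∧ i < cut then i else cut)
      (s.length : Int))
    = ((min (s.findIdx (· == '_')) (s.findIdx (· == '.')) : Nat) : Int) := by
  simp only [List.foldl_cons, List.foldl_nil, pv_find_single]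
  have hu := List.findIdx_le_length (p := (· == '_')) (xs := s)
  have hd := List.findIdx_le_length (p := (· == '.')) (xs := s)
  split_ifs <;> omega

-- ===== VERDICT (by name: the statement is the Claim_ definition above) =====
set_option maxRecDepth 8192 in
theorem should_mask_prompt_key_py_spec : Claim_equal_should_mask_prompt_key_py := by
  intro key _
  unfold Spec_should_mask_prompt_key_py should_mask_prompt_key_py should_mask_prompt_key_py_alt
  simp only [pvMarkersA, List.any_cons, List.any_nil, Bool.or_false,
    List.cons_append, List.nil_append]
  have e1 := pv_marker_iff ['p','r','o','m','p','t'] (PySem.Chars.lower key.toList) (by decide)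
  have e2 := pv_marker_iff ['t','e','x','t'] (PySem.Chars.lower key.toList) (by decide)
  have e3 := pv_marker_iff ['i','n','p','u','t'] (PySem.Chars.lower key.toList) (by decide)
  have e4 := pv_marker_iff ['q','u','e','r','y'] (PySem.Chars.lower key.toList) (by decide)
  have e5 := pv_marker_iff ['i','n','s','t','r','u','c','t','i','o','n'] (PySem.Chars.lower key.toList) (by decide)
  simp only [List.cons_append, List.nil_append] at e1 e2 e3 e4 e5
  rw [e1, e2, e3, e4, e5]
  rw [pv_cut_eq, PySem.Chars.slice_eq_listSlice, PySem.List.slice_to_natCast, pv_take_min]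
  have hc : PySem.Set.contains pvMarkerSetB
      (List.takeWhile (fun ch => !(ch == '_' || ch == '.')) (PySem.Chars.lower key.toList))
      = ((List.takeWhile (fun ch => !(ch == '_' || ch == '.')) (PySem.Chars.lower key.toList) == ['p','r','o','m','p','t'])
        || ((List.takeWhile (fun ch => !(ch == '_' || ch == '.')) (PySem.Chars.lower key.toList) == ['t','e','x','t'])
        || ((List.takeWhile (fun ch => !(ch == '_' || ch == '.')) (PySem.Chars.lower key.toList) == ['i','n','p','u','t'])
        || ((List.takeWhile (fun ch => !(ch == '_' || ch == '.')) (PySem.Chars.lower key.toList) == ['q','u','e','r','y'])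
        || ((List.takeWhile (fun ch => !(ch == '_' || ch == '.')) (PySem.Chars.lower key.toList) == ['i','n','s','t','r','u','c','t','i','o','n'])
        || false))))) := rfl
  rw [hc, Bool.or_false]
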